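-- pv_equiv track=rewrite | github.com/lessen/src | docs/cliffsDelta.py | basic
-- ===== SOURCE A (Python) =====
-- def basic(lst1,lst2):
--   lt=gt=n=0
--   for x in lst1:
--     for y in lst2:
--       n += 1
--       if x > y: gt +=1
--       if x < y: lt +=1
--   return lt,gt,n
-- ===== SOURCE B (Python) =====
-- def _count_lt(s, x):
--     # number of elements of sorted list s that are < x (bisect_left)
--     lo, hi = 0, len(s)
--     while lo < hi:
--         mid = (lo + hi) // 2
--         if s[mid] < x:
--             lo = mid + 1
--         else:
--             hi = mid
--     return lo
--
-- def _count_le(s, x):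
--     # number of elements of sorted list s that are <= x (bisect_right)
--     lo, hi = 0, len(s)
--     while lo < hi:
--         mid = (lo + hi) // 2
--         if x < s[mid]:
--             hi = mid
--         else:
--             lo = mid + 1
--     return lo
--
-- def basic(lst1, lst2):
--     s = sorted(lst2)
--     m = len(s)
--     lt = gt = 0
--     for x in lst1:
--         gt += _count_lt(s, x)
--         lt += m - _count_le(s, x)
--     return lt, gt, len(lst1) * m
-- ===== Notes on version B (the rewrite author's own statement) =====
-- stated objective: faster
-- what changed: Instead of comparing every pair, B sorts lst2 once and for each x in lst1 binary-searches (hand-written bisect_left/bisect_right) to count elements below/above x; n is computed as len(lst1)*len(lst2).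
import Mathlib
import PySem

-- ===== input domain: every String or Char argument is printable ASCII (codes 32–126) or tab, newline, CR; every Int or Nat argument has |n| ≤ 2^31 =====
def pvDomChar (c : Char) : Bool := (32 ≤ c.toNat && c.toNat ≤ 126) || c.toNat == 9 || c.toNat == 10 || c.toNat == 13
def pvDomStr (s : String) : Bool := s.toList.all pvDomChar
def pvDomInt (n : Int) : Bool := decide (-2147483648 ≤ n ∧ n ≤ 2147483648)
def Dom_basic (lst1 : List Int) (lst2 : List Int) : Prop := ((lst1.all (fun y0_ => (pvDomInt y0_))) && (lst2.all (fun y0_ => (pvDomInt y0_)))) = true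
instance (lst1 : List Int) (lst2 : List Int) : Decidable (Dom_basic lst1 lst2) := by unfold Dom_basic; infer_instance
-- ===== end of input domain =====

-- B sorts lst2 once and binary-searches per element of lst1 instead of comparing every pair.

-- ===== PORT A =====
-- state is (lt, gt, n), exactly A's three counters
def basic (lst1 : List Int) (lst2 : List Int) : Int × Int × Int :=
  lst1.foldl (fun st x =>
    lst2.foldl (fun st y =>
      let n := st.2.2 + 1
      let gt := if x > y then st.2.1 + 1 else st.2.1
      let lt := if x < y then st.1 + 1 else st.1
      (lt, gt, n)) st) ((0, 0, 0) : Int × Int × Int)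

-- ===== PORT B =====
-- _count_lt: hand-written bisect_left loop (s[mid] is always in range; getD is exact there)
def countLt (s : List Int) (x : Int) (lo hi : Nat) : Nat :=
  if lo < hi then
    let mid := (lo + hi) / 2
    if s.getD mid 0 < x then countLt s x (mid + 1) hi else countLt s x lo mid
  else lo
termination_by hi - lo
decreasing_by all_goals omega

-- _count_le: hand-written bisect_right loop
def countLe (s : List Int) (x : Int) (lo hi : Nat) : Nat :=
  if lo < hi then
    let mid := (lo + hi) / 2
    if x < s.getD mid 0 then countLe s x lo mid else countLe s x (mid + 1) hi
  else lo
termination_by hi - lo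
decreasing_by all_goals omega

def basic_alt (lst1 : List Int) (lst2 : List Int) : Int × Int × Int :=
  let s := PySem.List.sorted lst2 (fun y => y)
  let m : Int := (s.length : Int)
  let p := lst1.foldl (fun (st : Int × Int) x =>
    (st.1 + (m - (countLe s x 0 s.length : Int)), st.2 + (countLt s x 0 s.length : Int)))
    ((0, 0) : Int × Int)
  (p.1, p.2, (lst1.length : Int) * (lst2.length : Int))

-- ===== PRECONDITION & SPEC =====
def Spec_basic (lst1 : List Int) (lst2 : List Int) (out : Int × Int × Int) : Prop := out = basic_alt lst1 lst2
instance (lst1 : List Int) (lst2 : List Int) (out : Int × Int × Int) : Decidable (Spec_basic lst1 lst2 out) := by unfold Spec_basic; infer_instance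

-- ===== CLAIM (what is proved, stated in full; the proofs are below) =====
def Claim_equal_basic : Prop := ∀ (lst1 : List Int) (lst2 : List Int), Dom_basic lst1 lst2 → Spec_basic lst1 lst2 (basic lst1 lst2)

-- ===== LEMMAS AND PROOFS =====

-- On a sorted list, a downward-closed predicate holds exactly on the prefix of length countP
theorem countP_prefix (p : Int → Bool) (hmono : ∀ a b : Int, a ≤ b → p b = true → p a = true) :
    ∀ (s : List Int), s.Pairwise (· ≤ ·) → ∀ (i : Nat) (hi : i < s.length),
      (p s[i] = true ↔ i < s.countP p) := by
  intro s
  induction s with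
  | nil => intro _ i hi; simp at hi
  | cons a t ih =>
    intro hp i hi
    rcases List.pairwise_cons.mp hp with ⟨ha, hpt⟩
    cases i with
    | zero =>
      simp only [List.getElem_cons_zero, List.countP_cons]
      constructor
      · intro h; simp [h]
      · intro h
        by_contra hpa
        have hpa' : p a = false := Bool.eq_false_iff.mpr hpa
        have hz : t.countP p = 0 :=
          List.countP_eq_zero.mpr (fun y hy hpy => hpa (hmono a y (ha y hy) hpy))
        simp [hz, hpa'] at h
    | succ i =>
      simp only [List.getElem_cons_succ, List.countP_cons]
      have hi' : i < t.length := by simpa using hi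
      rcases Bool.eq_false_or_eq_true (p a) with h1 | h1
      · simp only [h1, if_true]
        rw [ih hpt i hi']
        omega
      · -- p a = false: nothing in t satisfies p either
        have hz : t.countP p = 0 :=
          List.countP_eq_zero.mpr
            (fun y hy hpy => (Bool.eq_false_iff.mp h1) (hmono a y (ha y hy) hpy))
        have hfalse : p t[i] = false :=
          Bool.eq_false_iff.mpr (List.countP_eq_zero.mp hz t[i] (List.getElem_mem hi'))
        simp [hz, h1, hfalse]

theorem getD_lt (s : List Int) (i : Nat) (h : i < s.length) : s.getD i 0 = s[i] :=
  List.getD_eq_getElem s 0 h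

-- binary search for bisect_left returns the count of elements < x
theorem countLt_eq (s : List Int) (x : Int) (hs : s.Pairwise (· ≤ ·)) :
    ∀ (d lo hi : Nat), hi - lo ≤ d →
      lo ≤ s.countP (fun y => decide (y < x)) → s.countP (fun y => decide (y < x)) ≤ hi →
      hi ≤ s.length → countLt s x lo hi = s.countP (fun y => decide (y < x)) := by
  intro d
  induction d with
  | zero =>
    intro lo hi hd h1 h2 h3
    rw [countLt]
    have : ¬ lo < hi := by omega
    simp [this]; omega
  | succ d ih =>
    intro lo hi hd h1 h2 h3
    rw [countLt]
    by_cases hlh : lo < hi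
    · simp only [hlh, if_true]
      have hmid : (lo + hi) / 2 < s.length := by omega
      have hiff := countP_prefix (fun y => decide (y < x))
        (by intro a b hab hb; simp at hb ⊢; omega) s hs ((lo + hi) / 2) hmid
      rw [getD_lt s _ hmid]
      by_cases hc : s[(lo + hi) / 2] < x
      · simp only [hc, if_true]
        have : (lo + hi) / 2 < s.countP (fun y => decide (y < x)) := by
          rw [← hiff]; simp only [decide_eq_true_eq]; omega
        exact ih ((lo + hi) / 2 + 1) hi (by omega) (by omega) h2 h3
      · simp only [hc, if_false]
        have : ¬ (lo + hi) / 2 < s.countP (fun y => decide (y < x)) := by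
          rw [← hiff]; simp only [decide_eq_true_eq]; omega
        exact ih lo ((lo + hi) / 2) (by omega) h1 (by omega) (by omega)
    · simp [hlh]; omega

-- binary search for bisect_right returns the count of elements ≤ x
theorem countLe_eq (s : List Int) (x : Int) (hs : s.Pairwise (· ≤ ·)) :
    ∀ (d lo hi : Nat), hi - lo ≤ d →
      lo ≤ s.countP (fun y => decide (y ≤ x)) → s.countP (fun y => decide (y ≤ x)) ≤ hi →
      hi ≤ s.length → countLe s x lo hi = s.countP (fun y => decide (y ≤ x)) := by
  intro d
  induction d with
  | zero =>
    intro lo hi hd h1 h2 h3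
    rw [countLe]
    have : ¬ lo < hi := by omega
    simp [this]; omega
  | succ d ih =>
    intro lo hi hd h1 h2 h3
    rw [countLe]
    by_cases hlh : lo < hi
    · simp only [hlh, if_true]
      have hmid : (lo + hi) / 2 < s.length := by omega
      have hiff := countP_prefix (fun y => decide (y ≤ x))
        (by intro a b hab hb; simp at hb ⊢; omega) s hs ((lo + hi) / 2) hmid
      rw [getD_lt s _ hmid]
      by_cases hc : x < s[(lo + hi) / 2]
      · simp only [hc, if_true]
        have : ¬ (lo + hi) / 2 < s.countP (fun y => decide (y ≤ x)) := by
          rw [← hiff]; simp only [decide_eq_true_eq]; omega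
        exact ih lo ((lo + hi) / 2) (by omega) h1 (by omega) (by omega)
      · simp only [hc, if_false]
        have : (lo + hi) / 2 < s.countP (fun y => decide (y ≤ x)) := by
          rw [← hiff]; simp only [decide_eq_true_eq]; omega
        exact ih ((lo + hi) / 2 + 1) hi (by omega) (by omega) h2 h3
    · simp [hlh]; omega

-- per-element counts for A
def cLT (lst2 : List Int) (x : Int) : Int := ((lst2.countP (fun y => decide (x < y)) : Nat) : Int)
def cGT (lst2 : List Int) (x : Int) : Int := ((lst2.countP (fun y => decide (y < x)) : Nat) : Int)

-- A's inner loop over lst2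
theorem basic_inner (lst2 : List Int) (x : Int) :
    ∀ (st : Int × Int × Int),
      lst2.foldl (fun st y =>
        let n := st.2.2 + 1
        let gt := if x > y then st.2.1 + 1 else st.2.1
        let lt := if x < y then st.1 + 1 else st.1
        (lt, gt, n)) st
      = (st.1 + cLT lst2 x, st.2.1 + cGT lst2 x, st.2.2 + (lst2.length : Int)) := by
  induction lst2 with
  | nil => intro st; simp [cLT, cGT]
  | cons y t ih =>
    intro st
    simp only [List.foldl_cons, ih]
    simp only [cLT, cGT, List.countP_cons, List.length_cons]
    by_cases h1 : x < y <;> by_cases h2 : y < x <;>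
      simp [h1, h2, Prod.ext_iff] <;> omega

-- A computes the per-element sums
theorem basic_eq (lst1 lst2 : List Int) :
    basic lst1 lst2 = ((lst1.map (cLT lst2)).sum, (lst1.map (cGT lst2)).sum,
      (lst1.length : Int) * (lst2.length : Int)) := by
  unfold basic
  have gen : ∀ (l1 : List Int) (st : Int × Int × Int),
      l1.foldl (fun st x =>
        lst2.foldl (fun st y =>
          let n := st.2.2 + 1
          let gt := if x > y then st.2.1 + 1 else st.2.1
          let lt := if x < y then st.1 + 1 else st.1
          (lt, gt, n)) st) st
      = (st.1 + (l1.map (cLT lst2)).sum, st.2.1 + (l1.map (cGT lst2)).sum,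
         st.2.2 + (l1.length : Int) * (lst2.length : Int)) := by
    intro l1
    induction l1 with
    | nil => intro st; simp
    | cons x t ih =>
      intro st
      rw [List.foldl_cons, basic_inner, ih]
      simp only [List.map_cons, List.sum_cons, List.length_cons]
      refine Prod.ext (by ring) (Prod.ext (by ring) ?_)
      push_cast
      ring
  rw [gen]; simp

-- B computes the same per-element sums
theorem basic_alt_eq (lst1 lst2 : List Int) :
    basic_alt lst1 lst2 = ((lst1.map (cLT lst2)).sum, (lst1.map (cGT lst2)).sum,
      (lst1.length : Int) * (lst2.length : Int)) := by
  unfold basic_alt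
  have hperm : (PySem.List.sorted lst2 (fun y => y)).Perm lst2 :=
    PySem.List.sorted_perm lst2 (fun y => y) false
  have hpw : (PySem.List.sorted lst2 (fun y => y)).Pairwise (· ≤ ·) :=
    PySem.List.sorted_pairwise lst2 (fun y => y)
  set s := PySem.List.sorted lst2 (fun y => y) with hsdef
  have hlen : s.length = lst2.length := hperm.length_eq
  have hGT : ∀ x : Int, (countLt s x 0 s.length : Int) = cGT lst2 x := by
    intro x
    have h := countLt_eq s x hpw s.length 0 s.length (by omega) (by omega)
      List.countP_le_length (le_refl _)
    rw [h, cGT, hperm.countP_eq]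
  have hLT : ∀ x : Int, (s.length : Int) - (countLe s x 0 s.length : Int) = cLT lst2 x := by
    intro x
    have h := countLe_eq s x hpw s.length 0 s.length (by omega) (by omega)
      List.countP_le_length (le_refl _)
    rw [h]
    have hlc := List.length_eq_countP_add_countP (fun y => decide (y ≤ x)) (l := s)
    have hc : s.countP (fun a => decide (¬ decide (a ≤ x) = true))
        = s.countP (fun y => decide (x < y)) :=
      List.countP_congr (fun y _ => by simp only [decide_eq_true_eq, decide_not,
        Bool.not_eq_true', decide_eq_false_iff_not]; omega)
    have hp2 := hperm.countP_eq (fun y => decide (x < y))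
    rw [cLT]
    omega
  have gen : ∀ (l1 : List Int) (st : Int × Int),
      l1.foldl (fun (st : Int × Int) x =>
        (st.1 + ((s.length : Int) - (countLe s x 0 s.length : Int)),
         st.2 + (countLt s x 0 s.length : Int))) st
      = (st.1 + (l1.map (cLT lst2)).sum, st.2 + (l1.map (cGT lst2)).sum) := by
    intro l1
    induction l1 with
    | nil => intro st; simp
    | cons x t ih =>
      intro st
      rw [List.foldl_cons, ih]
      simp only [List.map_cons, List.sum_cons, hGT, hLT]
      exact Prod.ext (by ring) (by ring)
  simp only [gen]
  simp

-- ===== VERDICT (by name: the statement is the Claim_ definition above) =====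
theorem basic_spec : Claim_equal_basic := by
  intro lst1 lst2 _
  unfold Spec_basic
  rw [basic_eq, basic_alt_eq]
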